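-- pv_equiv track=rewrite | github.com/paul5404/Python_coding | main.py | first_names
-- ===== SOURCE A (Python) =====
-- def first_names(names):
--     temp = {}
--     for idx, name in enumerate(names):
--         names[idx] = name[0]
--
--     for n in set(names):
--         temp[n] = names.count(n)
--
--     ans = ""
--     for key, value in temp.items():
--         if value >= 5:
--             ans += key
--
--     return "".join(sorted(ans)) if ans else "PREDAJA"
-- ===== SOURCE B (Python) =====
-- def first_names(names):
--     # Mutates names in place (first letters), same as A; return-value equivalence is what is claimed.
--     for idx, name in enumerate(names):
--         names[idx] = name[0]
--
--     s = sorted(names)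
--     result = []
--     prev = None
--     run = 0
--     for ch in s:
--         if prev == ch:
--             run += 1
--         else:
--             if prev is not None and run >= 5:
--                 result.append(prev)
--             prev = ch
--             run = 1
--     if prev is not None and run >= 5:
--         result.append(prev)
--
--     return "".join(result) if result else "PREDAJA"
-- ===== Notes on version B (the rewrite author's own statement) =====
-- stated objective: alternative
-- what changed: Replaces A's set/count/dict tally plus final sort by sorting the first letters once and walking the sorted list with a run-length scan, emitting each letter whose run reaches 5; the output is already in sorted order so no dict, no per-letter rescans and no final sort are needed.
import Mathlib
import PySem

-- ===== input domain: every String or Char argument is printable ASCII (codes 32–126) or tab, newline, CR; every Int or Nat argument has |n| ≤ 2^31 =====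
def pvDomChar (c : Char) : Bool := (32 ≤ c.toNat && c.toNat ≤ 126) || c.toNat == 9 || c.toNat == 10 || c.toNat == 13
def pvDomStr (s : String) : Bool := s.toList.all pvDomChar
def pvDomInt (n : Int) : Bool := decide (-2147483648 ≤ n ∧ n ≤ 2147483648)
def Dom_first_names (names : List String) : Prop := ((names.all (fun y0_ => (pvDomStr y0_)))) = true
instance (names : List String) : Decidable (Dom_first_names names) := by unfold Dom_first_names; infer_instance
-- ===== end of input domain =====

-- B replaces A's set/count/dict tally plus final sort by one sort of the first letters followed by a
-- single run-length scan of the sorted list (the result is emitted already in sorted order).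
-- Both Pythons mutate names in place the same way; the equivalence proved is about the return value.

-- ===== PORT A =====
-- names[idx] = name[0] : the 1-char string is represented by its Char (PySem.Chars convention);
-- the .getD ' ' default is never reached on Pre_ (name[0] raises IndexError exactly on "").
def first_names (names : List String) : String :=
  let firsts := names.map (fun name => (PySem.Str.pyGet? name 0).getD ' ')
  let temp : PySem.Dict Char Int :=
    (PySem.Set.ofList firsts).foldl (fun d n => d.insert n (firsts.count n : Int)) PySem.Dict.empty
  let ans := temp.items.foldl (fun acc kv => if 5 ≤ kv.2 then acc ++ [kv.1] else acc) ([] : List Char)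
  if ans ≠ [] then String.ofList (PySem.List.sorted ans (fun c => c) false) else "PREDAJA"

-- ===== PORT B =====
-- one loop step of Source B's run-length scan: state = (result, prev, run)
def fnStep (st : List Char × Option Char × Int) (ch : Char) : List Char × Option Char × Int :=
  match st with
  | (res, prev, run) =>
    if prev = some ch then (res, prev, run + 1)
    else (match prev with
          | some p => if 5 ≤ run then res ++ [p] else res
          | none => res,
          some ch, (1 : Int))

-- the flush after the loop ('if prev is not None and run >= 5: result.append(prev)')
def fnFinish (st : List Char × Option Char × Int) : List Char :=
  match st with
  | (res, prev, run) =>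
    match prev with
    | some p => if 5 ≤ run then res ++ [p] else res
    | none => res

def first_names_alt (names : List String) : String :=
  let firsts := names.map (fun name => (PySem.Str.pyGet? name 0).getD ' ')
  let s := PySem.List.sorted firsts (fun c => c) false
  let result := fnFinish (s.foldl fnStep (([] : List Char), (none : Option Char), (0 : Int)))
  if result ≠ [] then String.ofList result else "PREDAJA"

-- ===== PRECONDITION & SPEC =====
-- Pre_ excludes lists containing an empty string, on which both Pythons raise IndexError at name[0].
def Pre_first_names (names : List String) : Prop := "" ∉ names
instance (names : List String) : Decidable (Pre_first_names names) := by unfold Pre_first_names; infer_instance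
def pvWitness_first_names : List String := ["Ana", "Bob", "Ava"]

def Spec_first_names (names : List String) (out : String) : Prop := out = first_names_alt names
instance (names : List String) (out : String) : Decidable (Spec_first_names names out) := by unfold Spec_first_names; infer_instance

-- ===== CLAIM (what is proved, stated in full; the proofs are below) =====
def Claim_equal_first_names : Prop := ∀ (names : List String), Dom_first_names names → Pre_first_names names → Spec_first_names names (first_names names)

-- ===== LEMMAS AND PROOFS =====

-- proof-only spec of the run-length scan on a sorted list: each distinct letter with count ≥ 5, in order
def specFn : List Char → List Char
  | [] => []
  | c :: t =>
    (if 5 ≤ 1 + (t.count c : Int) then [c] else []) ++ specFn (t.filter (fun y => y ≠ c))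
termination_by s => s.length
decreasing_by
  simp only [List.length_unattach, List.length_cons]
  calc (t.attach.filter _).length ≤ t.attach.length := List.length_filter_le _ _
    _ = t.length := t.length_attach
    _ < t.length + 1 := Nat.lt_succ_self _

-- A's ans-building loop is the filtered first components of the items list.
theorem foldl_append_ite_fst (l : List (Char × Int)) (acc : List Char) :
    l.foldl (fun acc kv => if 5 ≤ kv.2 then acc ++ [kv.1] else acc) acc
      = acc ++ (l.filter (fun kv => decide (5 ≤ kv.2))).map (fun kv => kv.1) := by
  induction l generalizing acc with
  | nil => simp
  | cons x l ih =>
    simp only [List.foldl_cons, List.filter_cons]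
    by_cases h : 5 ≤ x.2 <;> simp [h, ih]

-- A's dict-building loop over fresh, pairwise-distinct keys builds exactly the mapped items list.
theorem items_foldl_insert_fresh (ks : List Char) (f : Char → Int) (d : PySem.Dict Char Int)
    (hfresh : ∀ k ∈ ks, d.contains k = false) (hnd : ks.Nodup) :
    (ks.foldl (fun d n => d.insert n (f n)) d).items = d.items ++ ks.map (fun n => (n, f n)) := by
  induction ks generalizing d with
  | nil => simp
  | cons x ks ih =>
    simp only [List.foldl_cons, List.map_cons]
    rw [ih]
    · rw [PySem.Dict.items_insert]
      simp [hfresh x (by simp)]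
    · intro k hk
      rw [PySem.Dict.contains_insert]
      have hne : k ≠ x := by
        rcases List.nodup_cons.mp hnd with ⟨hx, _⟩
        intro h; exact hx (h ▸ hk)
      simp [hne, hfresh k (List.mem_cons_of_mem _ hk)]
    · exact (List.nodup_cons.mp hnd).2

theorem specFn_sound_aux (n : Nat) : ∀ (s : List Char), s.length ≤ n → s.Pairwise (· ≤ ·) →
    (specFn s).Pairwise (· < ·) ∧ ∀ x, x ∈ specFn s ↔ x ∈ s ∧ 5 ≤ (s.count x : Int) := by
  induction n with
  | zero =>
    intro s hlen _
    have : s = [] := List.length_eq_zero_iff.mp (Nat.le_zero.mp hlen)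
    subst this; simp [specFn]
  | succ n ihn =>
    intro s hlen hs
    match s with
    | [] => simp [specFn]
    | c :: t =>
    have hlen' : t.length ≤ n := by simp only [List.length_cons] at hlen; omega
    have ih := fun h => ihn (t.filter (fun y => y ≠ c))
      (le_trans (List.length_filter_le _ _) hlen') h
    rw [specFn]
    rcases List.pairwise_cons.mp hs with ⟨hle, ht⟩
    have ht' : (t.filter (fun y => y ≠ c)).Pairwise (· ≤ ·) := ht.filter _
    rcases ih ht' with ⟨ihp, ihm⟩
    have hmem_gt : ∀ x ∈ specFn (t.filter (fun y => y ≠ c)), c < x := by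
      intro x hx
      rcases (ihm x).mp hx with ⟨hxm, _⟩
      rcases List.mem_filter.mp hxm with ⟨hxt, hne⟩
      have hne' : x ≠ c := by simpa using hne
      exact lt_of_le_of_ne (hle x hxt) (fun h => hne' h.symm)
    have hcount : ∀ x, x ≠ c → (t.filter (fun y => y ≠ c)).count x = t.count x := by
      intro x hx
      rw [List.count_filter]
      simp [hx]
    constructor
    · by_cases h : 5 ≤ 1 + (t.count c : Int)
      · simp only [h, if_true, List.singleton_append, List.pairwise_cons]
        exact ⟨hmem_gt, ihp⟩
      · simpa [h] using ihp
    · intro x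
      by_cases hxc : x = c
      · subst hxc
        have hnot : x ∉ specFn (t.filter (fun y => y ≠ x)) := by
          intro h; exact absurd rfl (ne_of_gt (hmem_gt x h))
        by_cases h : 5 ≤ 1 + (t.count x : Int)
        · simp only [h, if_true, List.singleton_append, List.mem_cons, List.count_cons_self]
          constructor
          · intro _; refine ⟨by simp, ?_⟩; push_cast; omega
          · intro _; simp
        · simp only [h, if_false, List.nil_append, List.count_cons_self]
          constructor
          · intro hm; exact absurd hm hnot
          · rintro ⟨_, hc⟩; exfalso; apply h; push_cast at hc ⊢; omega
      · have hmem : x ∈ specFn (t.filter (fun y => y ≠ c)) ↔ x ∈ t ∧ 5 ≤ (t.count x : Int) := by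
          rw [ihm x, hcount x hxc]
          constructor
          · rintro ⟨hm, hc⟩; exact ⟨(List.mem_filter.mp hm).1, hc⟩
          · rintro ⟨hm, hc⟩; exact ⟨List.mem_filter.mpr ⟨hm, by simpa using hxc⟩, hc⟩
        have hcnt : List.count x (c :: t) = List.count x t := by rw [List.count_cons]; simp [show ¬ c = x from fun h => hxc h.symm]
        by_cases h : 5 ≤ 1 + (t.count c : Int)
        · simp only [h, if_true, List.singleton_append, List.mem_cons, hmem, hcnt]
          constructor
          · rintro (rfl | ⟨hm, hc⟩)
            · exact absurd rfl hxc
            · exact ⟨Or.inr hm, hc⟩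
          · rintro ⟨rfl | hm, hc⟩
            · exact absurd rfl hxc
            · exact Or.inr ⟨hm, hc⟩
        · simp only [h, if_false, List.nil_append, List.mem_cons, hmem, hcnt]
          constructor
          · rintro ⟨hm, hc⟩; exact ⟨Or.inr hm, hc⟩
          · rintro ⟨rfl | hm, hc⟩
            · exact absurd rfl hxc
            · exact ⟨hm, hc⟩

theorem scan_run (s : List Char) : ∀ (p : Char) (run : Int) (res : List Char),
    (∀ x ∈ s, p ≤ x) → s.Pairwise (· ≤ ·) → 1 ≤ run →
    fnFinish (s.foldl fnStep (res, some p, run))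
      = res ++ (if 5 ≤ run + (s.count p : Int) then [p] else []) ++ specFn (s.filter (fun y => y ≠ p)) := by
  induction s with
  | nil =>
    intro p run res _ _ _
    simp only [List.foldl_nil, fnFinish, List.count_nil, List.filter_nil, specFn,
      Nat.cast_zero, add_zero, List.append_nil]
    by_cases h : 5 ≤ run <;> simp [h]
  | cons c t ih =>
    intro p run res hge hs hrun
    rcases List.pairwise_cons.mp hs with ⟨hle, ht⟩
    by_cases hcp : c = p
    · subst hcp
      have hstep : fnStep (res, some c, run) c = (res, some c, run + 1) := by
        simp [fnStep]
      rw [List.foldl_cons, hstep, ih c (run + 1) res hle ht (by omega)]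
      have hcnt : (List.count c (c :: t) : Int) = (List.count c t : Int) + 1 := by
        rw [List.count_cons_self]; push_cast; ring
      have hfil : (c :: t).filter (fun y => y ≠ c) = t.filter (fun y => y ≠ c) := by
        simp
      rw [hfil, hcnt]
      congr 2
      by_cases h : 5 ≤ run + 1 + (List.count c t : Int) <;>
        simp [h, show (5 ≤ run + ((List.count c t : Int) + 1)) ↔ (5 ≤ run + 1 + (List.count c t : Int)) by omega]
    · have hpc : p < c := lt_of_le_of_ne (hge c (by simp)) (fun h => hcp h.symm)
      have hnot : p ∉ c :: t := by
        intro hm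
        rcases List.mem_cons.mp hm with h | h
        · exact hcp h.symm
        · exact absurd (le_antisymm (le_of_lt hpc) (hle p h)) (fun h => hcp h.symm)
      have hstep : fnStep (res, some p, run) c
          = ((if 5 ≤ run then res ++ [p] else res), some c, (1 : Int)) := by
        simp [fnStep, show ¬ (some p = some c) by simpa using fun h => hcp h.symm]
      have hge' : ∀ x ∈ t, c ≤ x := hle
      rw [List.foldl_cons, hstep, ih c 1 _ hge' ht le_rfl]
      have hcnt : List.count p (c :: t) = 0 := List.count_eq_zero.mpr hnot
      have hfil : (c :: t).filter (fun y => y ≠ p) = c :: t := by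
        rw [List.filter_eq_self]
        intro a ha
        simp only [decide_eq_true_eq]
        intro h; subst h; exact hnot ha
      rw [hcnt, hfil, specFn]
      by_cases h : 5 ≤ run <;> by_cases h2 : 5 ≤ 1 + (List.count c t : Int) <;>
        simp [h, h2, List.append_assoc]
theorem scan_eq_specFn (s : List Char) (hs : s.Pairwise (· ≤ ·)) :
    fnFinish (s.foldl fnStep (([] : List Char), (none : Option Char), (0 : Int))) = specFn s := by
  match s with
  | [] => simp [fnFinish, specFn]
  | c :: t =>
    rcases List.pairwise_cons.mp hs with ⟨hle, ht⟩
    have hstep : fnStep (([] : List Char), (none : Option Char), (0 : Int)) c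
        = (([] : List Char), some c, (1 : Int)) := by simp [fnStep]
    rw [List.foldl_cons, hstep, scan_run t c 1 [] hle ht le_rfl, specFn]
    simp [add_comm]

theorem specFn_sound (s : List Char) (hs : s.Pairwise (· ≤ ·)) :
    (specFn s).Pairwise (· < ·) ∧ ∀ x, x ∈ specFn s ↔ x ∈ s ∧ 5 ≤ (s.count x : Int) :=
  specFn_sound_aux s.length s le_rfl hs

theorem lists_eq (firsts : List Char) :
    PySem.List.sorted
        (((PySem.Set.ofList firsts).foldl
            (fun d n => d.insert n ((firsts.count n : Int))) PySem.Dict.empty).items.foldl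
          (fun acc kv => if 5 ≤ kv.2 then acc ++ [kv.1] else acc) ([] : List Char))
        (fun c => c) false
      = fnFinish ((PySem.List.sorted firsts (fun c => c) false).foldl fnStep
          (([] : List Char), (none : Option Char), (0 : Int)))
    ∧ (((PySem.Set.ofList firsts).foldl
            (fun d n => d.insert n ((firsts.count n : Int))) PySem.Dict.empty).items.foldl
          (fun acc kv => if 5 ≤ kv.2 then acc ++ [kv.1] else acc) ([] : List Char) = [])
      = (fnFinish ((PySem.List.sorted firsts (fun c => c) false).foldl fnStep
          (([] : List Char), (none : Option Char), (0 : Int))) = []) := by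
  set s := PySem.List.sorted firsts (fun c => c) false with hsdef
  have hsp : s.Pairwise (· ≤ ·) := by
    simpa using PySem.List.sorted_pairwise firsts (fun c => c)
  have hperm : s.Perm firsts := PySem.List.sorted_perm firsts (fun c => c) false
  have hitems :
      ((PySem.Set.ofList firsts).foldl
          (fun d n => d.insert n ((firsts.count n : Int))) PySem.Dict.empty).items
        = (PySem.Set.ofList firsts).map (fun n => (n, (firsts.count n : Int))) := by
    rw [items_foldl_insert_fresh _ _ _ (by intro k _; simp [PySem.Dict.contains_empty])
        (PySem.Set.nodup_ofList _)]
    simp [PySem.Dict.empty]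
  rw [hitems, foldl_append_ite_fst, scan_eq_specFn s hsp]
  have hans : (((PySem.Set.ofList firsts).map (fun n => (n, (firsts.count n : Int)))).filter
        (fun kv => decide (5 ≤ kv.2))).map (fun kv => kv.1)
      = (PySem.Set.ofList firsts).filter (fun n => decide (5 ≤ (firsts.count n : Int))) := by
    rw [List.filter_map, List.map_map]
    simp [Function.comp_def]
  rw [List.nil_append, hans]
  set ans := (PySem.Set.ofList firsts).filter (fun n => decide (5 ≤ (firsts.count n : Int))) with hansdef
  rcases specFn_sound s hsp with ⟨hsspec, hmspec⟩
  have hnodup_spec : (specFn s).Nodup := hsspec.imp (fun h => ne_of_lt h)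
  have hnodup_ans : ans.Nodup := (PySem.Set.nodup_ofList firsts).filter _
  have hmem : ∀ x, x ∈ specFn s ↔ x ∈ ans := by
    intro x
    rw [hmspec x, hansdef, List.mem_filter, PySem.Set.mem_ofList]
    constructor
    · rintro ⟨hm, hc⟩
      refine ⟨hperm.mem_iff.mp hm, ?_⟩
      rw [decide_eq_true_eq, ← hperm.count_eq]
      exact hc
    · rintro ⟨hm, hc⟩
      refine ⟨hperm.mem_iff.mpr hm, ?_⟩
      rw [hperm.count_eq]
      exact decide_eq_true_eq.mp hc
  have hperm2 : (specFn s).Perm ans := (List.perm_ext_iff_of_nodup hnodup_spec hnodup_ans).mpr hmem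
  refine ⟨PySem.List.sorted_id_eq_of_perm_of_pairwise ans (specFn s) hperm2 (hsspec.imp (fun h => le_of_lt h)), ?_⟩
  simp only [eq_iff_iff]
  constructor
  · intro h; exact List.Perm.eq_nil (h ▸ hperm2)
  · intro h; exact List.Perm.eq_nil (h ▸ hperm2.symm)

theorem first_names_eq_alt (names : List String) : first_names names = first_names_alt names := by
  simp only [first_names, first_names_alt]
  rcases lists_eq (names.map (fun name => (PySem.Str.pyGet? name 0).getD ' ')) with ⟨h1, h2⟩
  rw [h1]
  have hiff := Iff.of_eq h2
  by_cases h : fnFinish ((PySem.List.sorted (names.map (fun name => (PySem.Str.pyGet? name 0).getD ' ')) (fun c => c) false).foldl fnStep (([] : List Char), (none : Option Char), (0 : Int))) = []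
  · rw [if_neg (fun hne => hne (hiff.mpr h)), if_neg (fun hne => hne h)]
  · rw [if_pos (fun hh => h (hiff.mp hh)), if_pos (fun hh => h hh)]

-- ===== VERDICT (by name: the statement is the Claim_ definition above) =====
theorem first_names_spec : Claim_equal_first_names := by
  intro names _ _
  unfold Spec_first_names
  exact first_names_eq_alt names
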